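-- pv_equiv track=rewrite | github.com/joannsum/XightMD | backend/agents/qa_agent.py | assess_patient_risk
-- ===== SOURCE A (Python) =====
-- from typing import Dict, Any, Optional, List
--
-- def assess_patient_risk(critical_findings: List[str], urgency_score: int) -> str:
--     """Assess overall patient risk level"""
--     if urgency_score >= 5 or any('Pneumothorax' in f for f in critical_findings):
--         return "HIGH"
--     elif urgency_score >= 4 or any('Mass' in f or 'Pneumonia' in f for f in critical_findings):
--         return "MODERATE"
--     elif urgency_score >= 3 or critical_findings:
--         return "LOW"
--     else:
--         return "MINIMAL"
-- ===== SOURCE B (Python) =====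
-- _LABELS = ["MINIMAL", "LOW", "MODERATE", "HIGH"]
--
-- def _finding_level(f):
--     if 'Pneumothorax' in f:
--         return 3
--     if 'Mass' in f or 'Pneumonia' in f:
--         return 2
--     return 1
--
-- def assess_patient_risk(critical_findings, urgency_score):
--     urgency_level = 3 if urgency_score >= 5 else 2 if urgency_score >= 4 else 1 if urgency_score >= 3 else 0
--     finding_level = 0
--     for f in critical_findings:
--         finding_level = max(finding_level, _finding_level(f))
--     return _LABELS[max(urgency_level, finding_level)]
-- ===== Notes on version B (the rewrite author's own statement) =====
-- stated objective: alternative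
-- what changed: Replaces the ordered if/elif OR-cascade by a score-then-map decomposition: an integer urgency level, a single max-fold over the findings computing a finding level, and a table lookup mapping max(levels) to the label.
import Mathlib
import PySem

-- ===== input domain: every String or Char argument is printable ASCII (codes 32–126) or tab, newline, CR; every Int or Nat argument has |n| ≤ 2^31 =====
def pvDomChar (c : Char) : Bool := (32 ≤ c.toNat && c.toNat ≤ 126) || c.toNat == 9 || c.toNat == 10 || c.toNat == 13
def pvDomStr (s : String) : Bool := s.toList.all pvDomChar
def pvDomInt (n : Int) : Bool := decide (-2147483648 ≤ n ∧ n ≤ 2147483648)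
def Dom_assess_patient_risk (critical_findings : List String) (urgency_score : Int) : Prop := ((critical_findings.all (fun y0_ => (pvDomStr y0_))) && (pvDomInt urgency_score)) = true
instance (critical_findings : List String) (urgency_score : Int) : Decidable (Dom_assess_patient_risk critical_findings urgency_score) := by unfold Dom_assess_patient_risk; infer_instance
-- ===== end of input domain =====

-- B replaces A's ordered if/elif OR-cascade by a score-then-map decomposition (alternative, same cost).
-- ===== PORT A =====
def assess_patient_risk (critical_findings : List String) (urgency_score : Int) : String :=
  if decide (5 ≤ urgency_score) || critical_findings.any (fun f => PySem.Str.isIn "Pneumothorax" f) then "HIGH"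
  else if decide (4 ≤ urgency_score) || critical_findings.any (fun f => PySem.Str.isIn "Mass" f || PySem.Str.isIn "Pneumonia" f) then "MODERATE"
  else if decide (3 ≤ urgency_score) || !critical_findings.isEmpty then "LOW"
  else "MINIMAL"

-- ===== PORT B =====
def pvLabels : List String := ["MINIMAL", "LOW", "MODERATE", "HIGH"]

def pvFindingLevel (f : String) : Nat :=
  if PySem.Str.isIn "Pneumothorax" f then 3
  else if PySem.Str.isIn "Mass" f || PySem.Str.isIn "Pneumonia" f then 2
  else 1

def assess_patient_risk_alt (critical_findings : List String) (urgency_score : Int) : String :=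
  let urgency_level : Nat :=
    if 5 ≤ urgency_score then 3 else if 4 ≤ urgency_score then 2 else if 3 ≤ urgency_score then 1 else 0
  let finding_level : Nat :=
    critical_findings.foldl (fun acc f => max acc (pvFindingLevel f)) 0
  pvLabels.getD (max urgency_level finding_level) ""

-- ===== PRECONDITION & SPEC =====
def Spec_assess_patient_risk (critical_findings : List String) (urgency_score : Int) (out : String) : Prop := out = assess_patient_risk_alt critical_findings urgency_score
instance (critical_findings : List String) (urgency_score : Int) (out : String) : Decidable (Spec_assess_patient_risk critical_findings urgency_score out) := by unfold Spec_assess_patient_risk; infer_instance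

-- ===== CLAIM (what is proved, stated in full; the proofs are below) =====
def Claim_equal_assess_patient_risk : Prop := ∀ (critical_findings : List String) (urgency_score : Int), Dom_assess_patient_risk critical_findings urgency_score → Spec_assess_patient_risk critical_findings urgency_score (assess_patient_risk critical_findings urgency_score)

-- ===== LEMMAS AND PROOFS =====

-- the max-fold over findings, characterised by the two any-tests of A
theorem pv_fold_eq (critical_findings : List String) (a : Nat) :
    critical_findings.foldl (fun acc f => max acc (pvFindingLevel f)) a =
      max a (if critical_findings.any (fun f => PySem.Str.isIn "Pneumothorax" f) then 3
             else if critical_findings.any (fun f => PySem.Str.isIn "Mass" f || PySem.Str.isIn "Pneumonia" f) then 2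
             else if critical_findings.isEmpty then 0 else 1) := by
  induction critical_findings generalizing a with
  | nil => simp
  | cons f cf ih =>
    rw [List.foldl_cons, ih]
    by_cases h1 : PySem.Str.isIn "Pneumothorax" f <;>
      by_cases h2 : PySem.Str.isIn "Mass" f || PySem.Str.isIn "Pneumonia" f <;>
      simp only [List.any_cons, List.isEmpty_cons, pvFindingLevel, h1, h2] <;>
      simp <;> split_ifs <;> omega

-- the whole branch structure, abstracted over the six tests (finitely many cases)
theorem pv_key (p5 p4 p3 : Prop) [Decidable p5] [Decidable p4] [Decidable p3]
    (bP bM bE : Bool) (h54 : p5 → p4) (h43 : p4 → p3) :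
    (if decide p5 || bP then "HIGH"
     else if decide p4 || bM then "MODERATE"
     else if decide p3 || !bE then "LOW"
     else "MINIMAL") =
      pvLabels.getD
        (max (if p5 then 3 else if p4 then 2 else if p3 then 1 else 0)
             (if bP then 3 else if bM then 2 else if bE then 0 else 1)) "" := by
  by_cases h5 : p5 <;> by_cases h4 : p4 <;> by_cases h3 : p3 <;>
    first
    | exact absurd (h54 h5) h4
    | exact absurd (h43 h4) h3
    | (cases bP <;> cases bM <;> cases bE <;> simp [h5, h4, h3, pvLabels])

-- ===== VERDICT (by name: the statement is the Claim_ definition above) =====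
theorem assess_patient_risk_spec : Claim_equal_assess_patient_risk := by
  intro cf u _
  unfold Spec_assess_patient_risk assess_patient_risk assess_patient_risk_alt
  simp only [pv_fold_eq, Nat.zero_max]
  exact pv_key _ _ _ _ _ _ (by omega) (by omega)
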